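-- pv_equiv track=rewrite | github.com/tihanaujevic/algorithms_in_Bioinformatics | chapter3/BA3D.py | DeBruijn
-- ===== SOURCE A (Python) =====
-- def DeBruijn (dna, k):
--     d = {}
--
--     for i in range(len(dna)- k):
--         if dna[i: i+k] not in d:
--             d[dna[i:i+k]] = [dna[i+1: i+k+1]]
--         else:
--             d[dna[i: i+k]].append(dna[i+1: i+k+1])
--
--     result = []
--
--     for key, value in d.items():
--         string = key + ' -> ' + ','.join(x for x in sorted(value))
--         result.append(string)
--
--     result = sorted(result)
--
--     return '\n'.join(x for x in result)
-- ===== SOURCE B (Python) =====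
-- def DeBruijn(dna, k):
--     edges = [(dna[i:i + k], dna[i + 1:i + k + 1]) for i in range(len(dna) - k)]
--     lines = [key + ' -> ' + ','.join(sorted(s for p, s in edges if p == key))
--              for key in sorted(set(p for p, _ in edges))]
--     return '\n'.join(sorted(lines))
-- ===== Notes on version B (the rewrite author's own statement) =====
-- stated objective: alternative
-- what changed: Replaces A's incremental dict-of-lists accumulation with a flat edge list from which each sorted distinct key's successors are gathered by filtering, then the finished lines are sorted and joined.
import Mathlib
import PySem

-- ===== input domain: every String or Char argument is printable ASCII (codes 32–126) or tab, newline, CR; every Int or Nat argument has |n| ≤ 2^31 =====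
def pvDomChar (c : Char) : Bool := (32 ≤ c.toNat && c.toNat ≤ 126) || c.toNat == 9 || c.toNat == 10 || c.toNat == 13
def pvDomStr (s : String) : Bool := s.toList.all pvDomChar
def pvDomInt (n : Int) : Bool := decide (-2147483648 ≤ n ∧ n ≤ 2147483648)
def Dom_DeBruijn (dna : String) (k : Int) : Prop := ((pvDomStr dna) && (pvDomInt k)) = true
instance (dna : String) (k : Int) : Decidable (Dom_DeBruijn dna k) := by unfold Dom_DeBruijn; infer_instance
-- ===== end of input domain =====

-- B replaces A's incremental dict-of-lists accumulation by a flat edge list with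
-- per-key filtering over the sorted distinct keys (alternative decomposition, no dict at all).

-- ===== PORT A =====
-- A: build dict key -> list of successors by one pass with insert/append, then
-- format 'key -> sorted vals' per item, sort the lines, join with newlines.
def DeBruijn (dna : String) (k : Int) : String :=
  let s := dna.toList
  let d : PySem.Dict (List Char) (List (List Char)) :=
    (PySem.List.pyRange 0 ((s.length : Int) - k)).foldl
      (fun d i =>
        if d.contains (PySem.List.slice s (some i) (some (i + k))) = false then
          d.insert (PySem.List.slice s (some i) (some (i + k)))
            [PySem.List.slice s (some (i + 1)) (some (i + k + 1))]
        else
          d.modify (PySem.List.slice s (some i) (some (i + k))) []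
            (fun v => v ++ [PySem.List.slice s (some (i + 1)) (some (i + k + 1))]))
      PySem.Dict.empty
  let result := d.items.map (fun kv =>
    kv.1 ++ " -> ".toList ++ PySem.Chars.join [','] (PySem.List.sorted kv.2 (fun x => x)))
  String.ofList (PySem.Chars.join ['\n'] (PySem.List.sorted result (fun x => x)))

-- ===== PORT B =====
-- B: flat list of edges (k-mer, successor); for each distinct key (sorted) gather its
-- successors by filtering the edge list; sort the finished lines and join.
def DeBruijn_alt (dna : String) (k : Int) : String :=
  let s := dna.toList
  let edges := (PySem.List.pyRange 0 ((s.length : Int) - k)).map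
    (fun i => (PySem.List.slice s (some i) (some (i + k)),
               PySem.List.slice s (some (i + 1)) (some (i + k + 1))))
  let lines := (PySem.List.sorted (PySem.Set.ofList (edges.map (fun p => p.1))) (fun x => x)).map
    (fun key => key ++ " -> ".toList ++
      PySem.Chars.join [','] (PySem.List.sorted ((edges.filter (fun p => p.1 == key)).map (fun p => p.2)) (fun x => x)))
  String.ofList (PySem.Chars.join ['\n'] (PySem.List.sorted lines (fun x => x)))

-- ===== PRECONDITION & SPEC =====
def Spec_DeBruijn (dna : String) (k : Int) (out : String) : Prop := out = DeBruijn_alt dna k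
instance (dna : String) (k : Int) (out : String) : Decidable (Spec_DeBruijn dna k out) := by unfold Spec_DeBruijn; infer_instance

-- ===== CLAIM (what is proved, stated in full; the proofs are below) =====
def Claim_equal_DeBruijn : Prop := ∀ (dna : String) (k : Int), Dom_DeBruijn dna k → Spec_DeBruijn dna k (DeBruijn dna k)

-- ===== LEMMAS AND PROOFS =====

-- the edge list of B, as a proof-side name
def pvEdges (s : List Char) (k : Int) : List (List Char × List Char) :=
  (PySem.List.pyRange 0 ((s.length : Int) - k)).map
    (fun i => (PySem.List.slice s (some i) (some (i + k)),
               PySem.List.slice s (some (i + 1)) (some (i + k + 1))))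

-- A's loop body (insert a fresh key / append to a present one) is exactly dict-modify with default []
lemma pv_body_modify (d : PySem.Dict (List Char) (List (List Char))) (p : List Char × List Char) :
    (if d.contains p.1 = false then d.insert p.1 [p.2]
     else d.modify p.1 [] (fun v => v ++ [p.2])) = d.modify p.1 [] (fun v => v ++ [p.2]) := by
  cases h : d.contains p.1 with
  | false => simp [PySem.Dict.modify, PySem.Dict.getD_of_not_contains d _ h]
  | true => simp

-- A's dict is the modify-fold over the edge list
lemma pv_fold_eq (s : List Char) (k : Int) :
    ((PySem.List.pyRange 0 ((s.length : Int) - k)).foldl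
      (fun d i =>
        if d.contains (PySem.List.slice s (some i) (some (i + k))) = false then
          d.insert (PySem.List.slice s (some i) (some (i + k)))
            [PySem.List.slice s (some (i + 1)) (some (i + k + 1))]
        else
          d.modify (PySem.List.slice s (some i) (some (i + k))) []
            (fun v => v ++ [PySem.List.slice s (some (i + 1)) (some (i + k + 1))]))
      PySem.Dict.empty)
    = (pvEdges s k).foldl (fun d p => d.modify p.1 [] (fun v => v ++ [p.2])) PySem.Dict.empty := by
  rw [pvEdges, List.foldl_map]
  apply PySem.List.foldl_congr_mem
  intro d i _
  exact pv_body_modify d (PySem.List.slice s (some i) (some (i + k)),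
    PySem.List.slice s (some (i + 1)) (some (i + k + 1)))

-- the items of A's dict: first-occurrence-ordered distinct keys, each with its filtered successors
lemma pv_items (s : List Char) (k : Int) :
    ((pvEdges s k).foldl (fun d p => d.modify p.1 [] (fun v => v ++ [p.2])) PySem.Dict.empty).items
    = (PySem.Set.ofList ((pvEdges s k).map (fun p => p.1))).map
        (fun key => (key, ((pvEdges s k).filter (fun p => p.1 == key)).map (fun p => p.2))) := by
  have hnd : ((pvEdges s k).foldl (fun d p => d.modify p.1 [] (fun v => v ++ [p.2]))
      PySem.Dict.empty).keys.Nodup :=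
    PySem.Dict.nodup_keys_foldl_modify_key (pvEdges s k) Prod.fst []
      (fun _ x v => v ++ [x.2]) PySem.Dict.empty (by simp [PySem.Dict.keys_empty])
  rw [PySem.Dict.items_eq_map_keys _ hnd [], PySem.Dict.keys_foldl_modify_key]
  refine List.map_congr_left (fun key _ => ?_)
  rw [PySem.Dict.getD_foldl_modify_append, PySem.Dict.getD_empty]
  simp

-- sorting the finished lines: mapping over the key set and mapping over the sorted key set
-- give permuted line lists, so their sorts coincide
lemma pv_sorted_map (K : List (List Char)) (line : List Char → List Char) :
    PySem.List.sorted (K.map line) (fun x => x)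
      = PySem.List.sorted ((PySem.List.sorted K (fun x => x)).map line) (fun x => x) := by
  have h := (PySem.List.sorted_eq_sorted_of_perm (List.map line K)
    (List.map line (PySem.List.sorted K (fun x => x))) (fun x => x) (fun a b h => h)
    ((PySem.List.sorted_perm K (fun x => x) false).map line).symm)
  convert h using 2

-- ===== VERDICT (by name: the statement is the Claim_ definition above) =====
theorem DeBruijn_spec : Claim_equal_DeBruijn := by
  intro dna k _
  unfold Spec_DeBruijn DeBruijn DeBruijn_alt
  simp only []
  rw [pv_fold_eq dna.toList k]
  rw [show (PySem.List.pyRange 0 ((dna.toList.length : Int) - k)).map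
      (fun i => (PySem.List.slice dna.toList (some i) (some (i + k)),
                 PySem.List.slice dna.toList (some (i + 1)) (some (i + k + 1))))
      = pvEdges dna.toList k from rfl]
  rw [pv_items dna.toList k, List.map_map]
  congr 1
  congr 1
  exact pv_sorted_map (PySem.Set.ofList ((pvEdges dna.toList k).map (fun p => p.1))) _
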